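-- pv_equiv track=rewrite | github.com/Jerry-at-GH/subtimer | align.py | nearest_boundary_value
-- ===== SOURCE A (Python) =====
-- from bisect import bisect_left
--
-- def nearest_boundary_value(x, boundaries, cap):
--     """
--     finds the nearest boundary value within cap range of x.
--     """
--     if not boundaries:
--         return None
--     i = bisect_left(boundaries, x)
--     candidates = []
--     if i < len(boundaries):
--         candidates.append(boundaries[i])
--     if i > 0:
--         candidates.append(boundaries[i - 1])
--     candidates = [c for c in candidates if abs(c - x) <= cap]
--     return min(candidates, key=lambda c: abs(c - x)) if candidates else None
-- ===== SOURCE B (Python) =====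
-- def nearest_boundary_value(x, boundaries, cap):
--     if not boundaries:
--         return None
--     best = min(boundaries, key=lambda c: (abs(c - x), -c))
--     return best if abs(best - x) <= cap else None
-- ===== Notes on version B (the rewrite author's own statement) =====
-- stated objective: simpler
-- what changed: Drops bisect_left and the two-neighbour candidate list/filter entirely: B takes one global min over all boundaries under the key (abs(c - x), -c) (larger value wins distance ties, matching A) and then applies the cap check once.
-- outside the precondition, e.g. on nearest_boundary_value(0, [5, 0], 3): A returns None, B returns 0
import Mathlib
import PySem

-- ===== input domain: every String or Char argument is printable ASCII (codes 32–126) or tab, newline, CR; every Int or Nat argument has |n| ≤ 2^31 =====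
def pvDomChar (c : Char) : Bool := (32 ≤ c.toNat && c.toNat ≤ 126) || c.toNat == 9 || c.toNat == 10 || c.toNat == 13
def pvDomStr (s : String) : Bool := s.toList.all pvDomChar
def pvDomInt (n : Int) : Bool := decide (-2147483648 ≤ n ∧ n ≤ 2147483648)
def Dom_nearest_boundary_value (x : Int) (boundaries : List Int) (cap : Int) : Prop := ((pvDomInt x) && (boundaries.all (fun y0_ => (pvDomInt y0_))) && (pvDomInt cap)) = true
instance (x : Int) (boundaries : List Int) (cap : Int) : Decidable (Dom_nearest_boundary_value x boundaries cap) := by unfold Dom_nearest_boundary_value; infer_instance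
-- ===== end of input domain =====

-- B drops the bisection and the two-neighbour candidate list entirely: one global
-- min over all boundaries under the key (abs(c-x), -c), then a single cap check
-- (objective: simpler; equivalent on sorted boundary lists, bisect's precondition).

-- ===== PORT A =====
-- min(candidates, key=lambda c: abs(c - x)) ported by hand, exact: first extremal element wins
def pyMinByAbsDist (x : Int) : List Int → Option Int
  | [] => none
  | c :: cs => some (cs.foldl (fun b c => if |c - x| < |b - x| then c else b) c)

def nearest_boundary_value (x : Int) (boundaries : List Int) (cap : Int) : Option Int :=
  if boundaries = [] then none
  else
    let i := PySem.List.bisectLeft boundaries x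
    -- both indexing sites are in range whenever their guard holds, so getD's default is never used
    let candidates : List Int :=
      (if i < boundaries.length then [boundaries.getD i 0] else []) ++
      (if 0 < i then [boundaries.getD (i - 1) 0] else [])
    let candidates := candidates.filter (fun c => |c - x| ≤ cap)
    pyMinByAbsDist x candidates

-- ===== PORT B =====
-- min(boundaries, key=lambda c: (abs(c - x), -c)) is PySem.List.min2? (tuple key, first
-- extremal element wins); it is none only on [], which the empty guard already excluded
def nearest_boundary_value_alt (x : Int) (boundaries : List Int) (cap : Int) : Option Int :=
  if boundaries = [] then none
  else
    match PySem.List.min2? boundaries (fun c => |c - x|) (fun c => -c) with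
    | some best => if |best - x| ≤ cap then some best else none
    | none => none

-- ===== PRECONDITION & SPEC =====
-- Pre_ excludes unsorted boundary lists: bisect_left's documented precondition is a sorted
-- list, and on unsorted input A's candidate pair — hence its result — is an accident of the
-- bisection index, while B returns the genuinely nearest value.
def Pre_nearest_boundary_value (x : Int) (boundaries : List Int) (cap : Int) : Prop :=
  boundaries.Pairwise (· ≤ ·)
instance (x : Int) (boundaries : List Int) (cap : Int) : Decidable (Pre_nearest_boundary_value x boundaries cap) := by unfold Pre_nearest_boundary_value; infer_instance

def pvWitness_nearest_boundary_value : Int × List Int × Int := (2, [1, 3, 7], 5)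

def Spec_nearest_boundary_value (x : Int) (boundaries : List Int) (cap : Int) (out : Option Int) : Prop := out = nearest_boundary_value_alt x boundaries cap
instance (x : Int) (boundaries : List Int) (cap : Int) (out : Option Int) : Decidable (Spec_nearest_boundary_value x boundaries cap out) := by unfold Spec_nearest_boundary_value; infer_instance

-- ===== CLAIM (what is proved, stated in full; the proofs are below) =====
def Claim_equal_nearest_boundary_value : Prop := ∀ (x : Int) (boundaries : List Int) (cap : Int), Dom_nearest_boundary_value x boundaries cap → Pre_nearest_boundary_value x boundaries cap → Spec_nearest_boundary_value x boundaries cap (nearest_boundary_value x boundaries cap)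

-- ===== LEMMAS AND PROOFS =====

-- "m is at least as good a choice as c" under Python's key (abs(c - x), -c):
-- strictly closer, or equally close and at least as large.
def kLe (x m c : Int) : Prop := |m - x| < |c - x| ∨ (|m - x| = |c - x| ∧ c ≤ m)

theorem kLe_refl (x m : Int) : kLe x m m := Or.inr ⟨rfl, le_refl m⟩

theorem kLe_trans {x a b c : Int} (h1 : kLe x a b) (h2 : kLe x b c) : kLe x a c := by
  unfold kLe at *
  simp only [Int.abs_eq_natAbs] at *
  omega

theorem kLe_antisymm {x a b : Int} (h1 : kLe x a b) (h2 : kLe x b a) : a = b := by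
  unfold kLe at *
  simp only [Int.abs_eq_natAbs] at *
  omega

-- the fold inside min2? (with the concrete keys) keeps a kLe-minimal element
theorem min2_cons_spec (x : Int) (l : List Int) : ∀ (a : Int),
    ∃ m, PySem.List.min2? (a :: l) (fun c => |c - x|) (fun c => -c) = some m ∧
      (m = a ∨ m ∈ l) ∧ kLe x m a ∧ ∀ c ∈ l, kLe x m c := by
  induction l with
  | nil => intro a; exact ⟨a, rfl, Or.inl rfl, kLe_refl x a, by simp⟩
  | cons h t ih =>
    intro a
    by_cases hcond : (decide (|h - x| < |a - x|) || !decide (|a - x| < |h - x|) && decide (-h < -a)) = true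
    · have hstep : PySem.List.min2? (a :: h :: t) (fun c => |c - x|) (fun c => -c)
          = PySem.List.min2? (h :: t) (fun c => |c - x|) (fun c => -c) := by
        show List.foldl _ (some a) (h :: t) = _
        rw [List.foldl_cons]
        show List.foldl _ (if _ then some h else some a) t = _
        rw [if_pos hcond]
        rfl
      have hha : kLe x h a := by
        unfold kLe
        simp only [Bool.or_eq_true, Bool.and_eq_true, Bool.not_eq_true',
          decide_eq_true_eq, decide_eq_false_iff_not] at hcond
        simp only [Int.abs_eq_natAbs] at *; omega
      obtain ⟨m, heq, hmem, hle, hall⟩ := ih h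
      refine ⟨m, hstep.trans heq, ?_, kLe_trans hle hha, ?_⟩
      · rcases hmem with rfl | hm
        · exact Or.inr (List.mem_cons_self ..)
        · exact Or.inr (List.mem_cons_of_mem _ hm)
      · intro c hc
        rcases List.mem_cons.mp hc with rfl | hc
        · exact hle
        · exact hall c hc
    · have hstep : PySem.List.min2? (a :: h :: t) (fun c => |c - x|) (fun c => -c)
          = PySem.List.min2? (a :: t) (fun c => |c - x|) (fun c => -c) := by
        show List.foldl _ (some a) (h :: t) = _
        rw [List.foldl_cons]
        show List.foldl _ (if _ then some h else some a) t = _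
        rw [if_neg hcond]
        rfl
      have hah : kLe x a h := by
        unfold kLe
        simp only [Bool.or_eq_true, Bool.and_eq_true, Bool.not_eq_true',
          decide_eq_true_eq, decide_eq_false_iff_not, not_or, not_and] at hcond
        simp only [Int.abs_eq_natAbs] at *; omega
      obtain ⟨m, heq, hmem, hle, hall⟩ := ih a
      refine ⟨m, hstep.trans heq, ?_, hle, ?_⟩
      · rcases hmem with rfl | hm
        · exact Or.inl rfl
        · exact Or.inr (List.mem_cons_of_mem _ hm)
      · intro c hc
        rcases List.mem_cons.mp hc with rfl | hc
        · exact kLe_trans hle hah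
        · exact hall c hc

-- B returns "the kLe-minimal element if within cap, else None"
theorem exists_canon_B (x : Int) (bs : List Int) (cap : Int) (hne : bs ≠ []) :
    ∃ m, m ∈ bs ∧ (∀ c ∈ bs, kLe x m c) ∧
      nearest_boundary_value_alt x bs cap = if |m - x| ≤ cap then some m else none := by
  cases bs with
  | nil => exact absurd rfl hne
  | cons h t =>
    obtain ⟨m, heq, hmem, hle, hall⟩ := min2_cons_spec x t h
    refine ⟨m, ?_, ?_, ?_⟩
    · rcases hmem with rfl | hm
      · exact List.mem_cons_self ..
      · exact List.mem_cons_of_mem _ hm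
    · intro c hc
      rcases List.mem_cons.mp hc with rfl | hc
      · exact hle
      · exact hall c hc
    · unfold nearest_boundary_value_alt
      simp only [if_neg (by simp : ¬(h :: t = []))]
      rw [heq]

-- in a sorted list, an element ≥ x that is a lower bound of the tail beats every element with index ≥ i,
-- and one < x that is an upper bound of the prefix beats every element with index < i; assembled here:
theorem exists_canon_A (x : Int) (bs : List Int) (cap : Int)
    (hs : bs.Pairwise (· ≤ ·)) (hne : bs ≠ []) :
    ∃ m, m ∈ bs ∧ (∀ c ∈ bs, kLe x m c) ∧
      nearest_boundary_value x bs cap = if |m - x| ≤ cap then some m else none := by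
  obtain ⟨hlen, hlo, hhi⟩ := PySem.List.bisectLeft_spec bs x hs
  set i := PySem.List.bisectLeft bs x with hidef
  have hlen0 : 0 < bs.length := List.length_pos_iff.mpr hne
  have hmono : ∀ (p q : Nat) (hp : p < bs.length) (hq : q < bs.length), p ≤ q → bs[p] ≤ bs[q] := by
    intro p q hp hq hpq
    rcases Nat.lt_or_ge p q with hlt | hge
    · exact (List.pairwise_iff_getElem.mp hs) p q hp hq hlt
    · have : p = q := le_antisymm hpq hge
      subst this; exact le_refl _
  -- kLe of the lower neighbour against every element left of i
  have hleft : ∀ (hi0 : 0 < i), ∀ c ∈ bs, (∃ j, ∃ hj : j < bs.length, j < i ∧ bs[j] = c) →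
      kLe x (bs[i-1]'(by omega)) c := by
    intro hi0 c _ ⟨j, hj, hji, hjc⟩
    have h1 : bs[i-1]'(by omega) < x := hlo (i-1) (by omega) (by omega)
    have h2 : bs[j] < x := hlo j hj hji
    have h3 : bs[j] ≤ bs[i-1]'(by omega) := hmono j (i-1) hj (by omega) (by omega)
    unfold kLe; subst hjc; simp only [Int.abs_eq_natAbs]; omega
  -- kLe of the upper neighbour against every element right of i
  have hright : ∀ (hin : i < bs.length), ∀ c ∈ bs, (∃ j, ∃ hj : j < bs.length, i ≤ j ∧ bs[j] = c) →
      kLe x (bs[i]'(by omega)) c := by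
    intro hin c _ ⟨j, hj, hji, hjc⟩
    have h1 : x ≤ bs[i] := hhi i hin (le_refl i)
    have h2 : x ≤ bs[j] := hhi j hj hji
    have h3 : bs[i] ≤ bs[j] := hmono i j hin hj hji
    unfold kLe; subst hjc; simp only [Int.abs_eq_natAbs]; omega
  have hmemidx : ∀ c ∈ bs, ∃ j, ∃ hj : j < bs.length, bs[j] = c := by
    intro c hc; exact List.mem_iff_getElem.mp hc
  -- unfold A down to the candidate computation
  have hA : nearest_boundary_value x bs cap =
      pyMinByAbsDist x (((if i < bs.length then [bs.getD i 0] else []) ++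
        (if 0 < i then [bs.getD (i-1) 0] else [])).filter (fun c => |c - x| ≤ cap)) := by
    unfold nearest_boundary_value
    simp only [if_neg hne]
    rw [← hidef]
  rcases Nat.eq_zero_or_pos i with hi0 | hipos
  · -- i = 0: the only candidate is bs[0], and every element is ≥ x
    have hin : i < bs.length := by omega
    refine ⟨bs[i], List.getElem_mem hin, ?_, ?_⟩
    · intro c hc
      obtain ⟨j, hj, hjc⟩ := hmemidx c hc
      exact hright hin c hc ⟨j, hj, by omega, hjc⟩
    · rw [hA]
      simp only [if_pos hin, hi0]
      simp only [show ¬(0:Nat) < 0 by omega, if_false, List.append_nil]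
      rw [List.getD_eq_getElem bs 0 (show 0 < bs.length by omega)]
      by_cases hcap : |bs[0] - x| ≤ cap
      · simp [List.filter, hcap, pyMinByAbsDist, hlen0]
      · simp [List.filter, hcap, pyMinByAbsDist, hlen0]
  · rcases Nat.lt_or_ge i bs.length with hin | hend
    · -- 0 < i < len: two candidates; the canonical minimum is the better of the two
      have hi1 : i - 1 < bs.length := by omega
      set lo := bs[i-1] with hlodef
      set hibv := bs[i] with hhidef
      set m : Int := if |lo - x| < |hibv - x| then lo else hibv with hmdef
      have hlox : lo < x := hlo (i-1) hi1 (by omega)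
      have hhix : x ≤ hibv := hhi i hin (le_refl i)
      have hm_le_lo : kLe x m lo := by
        unfold kLe; rw [hmdef]; split_ifs with h
        · exact Or.inr ⟨rfl, le_refl _⟩
        · simp only [Int.abs_eq_natAbs] at *; omega
      have hm_le_hi : kLe x m hibv := by
        unfold kLe; rw [hmdef]; split_ifs with h
        · exact Or.inl h
        · exact Or.inr ⟨rfl, le_refl _⟩
      have hmmem : m ∈ bs := by
        rw [hmdef]; split_ifs
        · exact List.getElem_mem hi1
        · exact List.getElem_mem hin
      refine ⟨m, hmmem, ?_, ?_⟩
      · intro c hc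
        obtain ⟨j, hj, hjc⟩ := hmemidx c hc
        rcases Nat.lt_or_ge j i with hji | hji
        · exact kLe_trans hm_le_lo (hleft hipos c hc ⟨j, hj, hji, hjc⟩)
        · exact kLe_trans hm_le_hi (hright hin c hc ⟨j, hj, hji, hjc⟩)
      · rw [hA]
        simp only [if_pos hin, if_pos hipos]
        rw [List.getD_eq_getElem bs 0 (show i < bs.length by omega), List.getD_eq_getElem bs 0 (show i-1 < bs.length by omega)]
        rw [← hlodef, ← hhidef]
        by_cases hc1 : |hibv - x| ≤ cap <;> by_cases hc2 : |lo - x| ≤ cap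
        · -- both within cap: pyMinByAbsDist folds over [hibv, lo]
          simp only [List.filter, hc1, hc2, decide_true, List.cons_append, List.nil_append,
            pyMinByAbsDist, List.foldl_cons, List.foldl_nil]
          rw [hmdef]
          split_ifs with h
          · have : |m - x| ≤ cap := by rw [hmdef, if_pos h]; exact hc2
            simp_all
          · have : |m - x| ≤ cap := by rw [hmdef, if_neg h]; exact hc1
            simp_all
        · -- only the upper neighbour within cap ⇒ it is the closer one
          have hm : m = hibv := by
            rw [hmdef]; simp only [Int.abs_eq_natAbs] at *
            split_ifs with h
            · exfalso; omega
            · rfl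
          simp only [List.filter, hc1, hc2, decide_true, decide_false, List.cons_append,
            List.nil_append, pyMinByAbsDist, List.foldl_nil, hm]
          simp [hc1]
        · -- only the lower neighbour within cap ⇒ it is the closer one
          have hm : m = lo := by
            rw [hmdef]; simp only [Int.abs_eq_natAbs] at *
            split_ifs with h
            · rfl
            · exfalso; omega
          simp only [List.filter, hc1, hc2, decide_true, decide_false, List.cons_append,
            List.nil_append, pyMinByAbsDist, List.foldl_nil, hm]
          simp [hc2]
        · -- neither within cap ⇒ both sides None
          have hmcap : ¬ |m - x| ≤ cap := by
            rw [hmdef]; split_ifs <;> assumption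
          simp [List.filter_cons, hc1, hc2, pyMinByAbsDist, hmcap]
    · -- i = len: the only candidate is bs[len-1], and every element is < x
      have hi1 : i - 1 < bs.length := by omega
      refine ⟨bs[i-1], List.getElem_mem hi1, ?_, ?_⟩
      · intro c hc
        obtain ⟨j, hj, hjc⟩ := hmemidx c hc
        exact hleft hipos c hc ⟨j, hj, by omega, hjc⟩
      · rw [hA]
        simp only [if_neg (by omega : ¬ i < bs.length), if_pos hipos, List.nil_append]
        rw [List.getD_eq_getElem bs 0 (show i-1 < bs.length by omega)]
        by_cases hcap : |bs[i-1]'hi1 - x| ≤ cap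
        · simp [List.filter, hcap, pyMinByAbsDist]
        · simp [List.filter, hcap, pyMinByAbsDist]

-- ===== VERDICT (by name: the statement is the Claim_ definition above) =====
theorem nearest_boundary_value_spec : Claim_equal_nearest_boundary_value := by
  intro x bs cap _ hpre
  unfold Spec_nearest_boundary_value
  by_cases hne : bs = []
  · subst hne; rfl
  · obtain ⟨mA, hAmem, hAmin, hAeq⟩ := exists_canon_A x bs cap hpre hne
    obtain ⟨mB, hBmem, hBmin, hBeq⟩ := exists_canon_B x bs cap hne
    have : mA = mB := kLe_antisymm (hAmin mB hBmem) (hBmin mA hAmem)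
    rw [hAeq, hBeq, this]
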